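-- pv_equiv track=rewrite | github.com/OceanEyeFF/vibecoding_autoworkflow | toolchain/scripts/test/harness_scope_gate.py | filter_effective_changed_files
-- ===== SOURCE A (Python) =====
-- def dedupe_paths(paths: list[str]) -> list[str]:
--     deduped: list[str] = []
--     seen: set[str] = set()
--     for path in paths:
--         if not path or path in seen:
--             continue
--         seen.add(path)
--         deduped.append(path)
--     return deduped
--
-- def filter_effective_changed_files(changed_files: list[str], exclude_prefixes: list[str]) -> tuple[list[str], list[str]]:
--     effective: list[str] = []
--     ignored: list[str] = []
--     for path in changed_files:
--         if path.startswith(".git") or any(path.startswith(prefix) for prefix in exclude_prefixes):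
--             ignored.append(path)
--             continue
--         effective.append(path)
--     return dedupe_paths(effective), dedupe_paths(ignored)
-- ===== SOURCE B (Python) =====
-- def filter_effective_changed_files(changed_files: list[str], exclude_prefixes: list[str]) -> tuple[list[str], list[str]]:
--     # Dedupe first (drop empty/duplicate paths, keep first occurrence),
--     # then route each surviving path to exactly one partition in a single loop.
--     effective: list[str] = []
--     ignored: list[str] = []
--     seen: set[str] = set()
--     for path in changed_files:
--         if not path or path in seen:
--             continue
--         seen.add(path)
--         if path.startswith(".git") or any(path.startswith(prefix) for prefix in exclude_prefixes):
--             ignored.append(path)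
--         else:
--             effective.append(path)
--     return effective, ignored
-- ===== Notes on version B (the rewrite author's own statement) =====
-- stated objective: simpler
-- what changed: B reverses the phase order: one shared-seen dedupe-and-route loop instead of A's partition pass followed by two separate dedupe passes with their own seen sets; duplicate and empty paths are skipped before the prefix tests.
import Mathlib
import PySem

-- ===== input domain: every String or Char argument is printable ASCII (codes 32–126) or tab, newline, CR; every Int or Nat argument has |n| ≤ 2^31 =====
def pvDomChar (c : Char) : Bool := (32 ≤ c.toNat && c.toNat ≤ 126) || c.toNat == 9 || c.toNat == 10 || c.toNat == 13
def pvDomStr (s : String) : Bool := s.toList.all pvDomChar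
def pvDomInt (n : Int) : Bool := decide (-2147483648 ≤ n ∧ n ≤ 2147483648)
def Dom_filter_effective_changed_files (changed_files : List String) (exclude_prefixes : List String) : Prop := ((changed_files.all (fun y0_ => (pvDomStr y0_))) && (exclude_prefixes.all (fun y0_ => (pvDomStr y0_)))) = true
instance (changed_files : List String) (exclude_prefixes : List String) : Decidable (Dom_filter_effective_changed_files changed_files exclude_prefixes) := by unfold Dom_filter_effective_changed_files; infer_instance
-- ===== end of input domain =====

-- B reverses the phase order: one dedupe-and-route loop with a single shared seen set,
-- instead of A's partition loop followed by two independent dedupe passes. Same return value.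

-- ===== PORT A =====
-- helper dedupe_paths: first occurrences of non-empty paths, in order
def dedupePaths (paths : List String) : List String :=
  (paths.foldl
    (fun (st : List String × PySem.Set String) path =>
      if path = "" ∨ st.2.contains path then st
      else (st.1 ++ [path], st.2.add path))
    ([], PySem.Set.empty)).1

def filter_effective_changed_files (changed_files : List String) (exclude_prefixes : List String) : List String × List String :=
  let st := changed_files.foldl
    (fun (st : List String × List String) path =>
      if PySem.Str.startswith path ".git" ∨ exclude_prefixes.any (fun prefix_ => PySem.Str.startswith path prefix_) then
        (st.1, st.2 ++ [path])
      else
        (st.1 ++ [path], st.2))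
    ([], [])
  (dedupePaths st.1, dedupePaths st.2)

-- ===== PORT B =====
def filter_effective_changed_files_alt (changed_files : List String) (exclude_prefixes : List String) : List String × List String :=
  let st := changed_files.foldl
    (fun (st : List String × List String × PySem.Set String) path =>
      if path = "" ∨ st.2.2.contains path then st
      else
        let seen := st.2.2.add path
        if PySem.Str.startswith path ".git" ∨ exclude_prefixes.any (fun prefix_ => PySem.Str.startswith path prefix_) then
          (st.1, st.2.1 ++ [path], seen)
        else
          (st.1 ++ [path], st.2.1, seen))
    ([], [], PySem.Set.empty)
  (st.1, st.2.1)

-- ===== PRECONDITION & SPEC =====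
def Spec_filter_effective_changed_files (changed_files : List String) (exclude_prefixes : List String) (out : List String × List String) : Prop := out = filter_effective_changed_files_alt changed_files exclude_prefixes
instance (changed_files : List String) (exclude_prefixes : List String) (out : List String × List String) : Decidable (Spec_filter_effective_changed_files changed_files exclude_prefixes out) := by unfold Spec_filter_effective_changed_files; infer_instance

-- ===== CLAIM (what is proved, stated in full; the proofs are below) =====
def Claim_equal_filter_effective_changed_files : Prop := ∀ (changed_files : List String) (exclude_prefixes : List String), Dom_filter_effective_changed_files changed_files exclude_prefixes → Spec_filter_effective_changed_files changed_files exclude_prefixes (filter_effective_changed_files changed_files exclude_prefixes)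

-- ===== LEMMAS AND PROOFS =====

-- the routing predicate shared by both programs
def pvExcl (exclude_prefixes : List String) (path : String) : Bool :=
  PySem.Str.startswith path ".git" || exclude_prefixes.any (fun prefix_ => PySem.Str.startswith path prefix_)

-- functional model of dedupe with the seen set abstracted to its characteristic function
def pvDD (xs : List String) (seen : String → Bool) : List String :=
  match xs with
  | [] => []
  | p :: t => if p = "" ∨ seen p = true then pvDD t seen else p :: pvDD t (fun x => x == p || seen x)

theorem pvDD_cons_skip (p : String) (l : List String) (f : String → Bool)
    (hp : p = "" ∨ f p = true) : pvDD (p :: l) f = pvDD l f := by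
  simp only [pvDD, if_pos hp]

theorem pvDD_cons_keep (p : String) (l : List String) (f : String → Bool)
    (hp : ¬ (p = "" ∨ f p = true)) : pvDD (p :: l) f = p :: pvDD l (fun x => x == p || f x) := by
  simp only [pvDD, if_neg hp]

theorem pvDD_notmem (xs : List String) (f : String → Bool) (p : String) (h : p ∉ xs) :
    pvDD xs (fun x => x == p || f x) = pvDD xs f := by
  induction xs generalizing f with
  | nil => rfl
  | cons q t ih =>
    have hqp : (q == p) = false := by
      simp only [beq_eq_false_iff_ne]; intro e; exact h (e ▸ List.mem_cons_self)
    have ht : p ∉ t := fun m => h (List.mem_cons_of_mem _ m)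
    simp only [pvDD, hqp, Bool.false_or]
    split
    · exact ih f ht
    · have : (fun x => x == q || (x == p || f x)) = (fun x => x == p || (x == q || f x)) := by
        funext x; cases hx : x == q <;> cases hy : x == p <;> simp
      rw [this, ih _ ht]

theorem contains_add_fun (s : PySem.Set String) (f : String → Bool) (p : String)
    (hf : ∀ x, s.contains x = f x) (x : String) :
    (s.add p).contains x = (x == p || f x) := by
  by_cases hx : x ∈ PySem.Set.add s p
  · rw [(PySem.Set.contains_iff _ _).2 hx]
    rcases (PySem.Set.mem_add _ _ _).1 hx with h | h
    · have hs := (PySem.Set.contains_iff _ _).2 h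
      rw [hf x] at hs
      simp [hs]
    · simp [h]
  · have hc : (s.add p).contains x = false := by
      cases h : (s.add p).contains x
      · rfl
      · exact absurd ((PySem.Set.contains_iff _ _).1 h) hx
    rw [hc]
    have hxp : (x == p) = false := by
      simp only [beq_eq_false_iff_ne]
      exact fun e => hx ((PySem.Set.mem_add _ _ _).2 (Or.inr e))
    have hfx : f x = false := by
      cases h : f x
      · rfl
      · rw [← hf x] at h
        exact absurd ((PySem.Set.contains_iff _ _).1 h) fun m => hx ((PySem.Set.mem_add _ _ _).2 (Or.inl m))
    simp [hxp, hfx]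

theorem dedupe_fold (xs : List String) (acc : List String) (s : PySem.Set String)
    (f : String → Bool) (hf : ∀ x, s.contains x = f x) :
    (xs.foldl
      (fun (st : List String × PySem.Set String) path =>
        if path = "" ∨ st.2.contains path then st
        else (st.1 ++ [path], st.2.add path)) (acc, s)).1 = acc ++ pvDD xs f := by
  induction xs generalizing acc s f with
  | nil => simp [pvDD]
  | cons p t ih =>
    simp only [List.foldl_cons, pvDD, hf p]
    by_cases hp : p = "" ∨ f p = true
    · simp only [if_pos hp]; exact ih acc s f hf
    · simp only [if_neg hp]
      rw [ih (acc ++ [p]) (s.add p) (fun x => x == p || f x) (contains_add_fun s f p hf)]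
      simp

theorem dedupePaths_eq (xs : List String) : dedupePaths xs = pvDD xs (fun _ => false) := by
  unfold dedupePaths
  rw [dedupe_fold xs [] PySem.Set.empty (fun _ => false) (by intro x; rfl)]
  simp

theorem partition_fold (ex : List String) (xs : List String) (a b : List String) :
    xs.foldl
      (fun (st : List String × List String) path =>
        if PySem.Str.startswith path ".git" ∨ ex.any (fun prefix_ => PySem.Str.startswith path prefix_) then
          (st.1, st.2 ++ [path])
        else
          (st.1 ++ [path], st.2)) (a, b)
    = (a ++ xs.filter (fun p => !(pvExcl ex p)), b ++ xs.filter (pvExcl ex)) := by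
  induction xs generalizing a b with
  | nil => simp
  | cons p t ih =>
    simp only [List.foldl_cons, List.filter_cons]
    by_cases hp : pvExcl ex p = true
    · have : PySem.Str.startswith p ".git" ∨ ex.any (fun prefix_ => PySem.Str.startswith p prefix_) := by
        simpa [pvExcl] using hp
      rw [if_pos this, ih]
      simp [hp]
    · have : ¬ (PySem.Str.startswith p ".git" ∨ ex.any (fun prefix_ => PySem.Str.startswith p prefix_)) := by
        simpa [pvExcl] using hp
      rw [if_neg this, ih]
      simp [hp]

theorem bfold (ex : List String) (xs : List String) (a b : List String) (s : PySem.Set String)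
    (f : String → Bool) (hf : ∀ x, s.contains x = f x) :
    (xs.foldl
      (fun (st : List String × List String × PySem.Set String) path =>
        if path = "" ∨ st.2.2.contains path then st
        else
          let seen := st.2.2.add path
          if PySem.Str.startswith path ".git" ∨ ex.any (fun prefix_ => PySem.Str.startswith path prefix_) then
            (st.1, st.2.1 ++ [path], seen)
          else
            (st.1 ++ [path], st.2.1, seen)) (a, b, s)).1
      = a ++ pvDD (xs.filter (fun p => !(pvExcl ex p))) f
    ∧ (xs.foldl
      (fun (st : List String × List String × PySem.Set String) path =>
        if path = "" ∨ st.2.2.contains path then st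
        else
          let seen := st.2.2.add path
          if PySem.Str.startswith path ".git" ∨ ex.any (fun prefix_ => PySem.Str.startswith path prefix_) then
            (st.1, st.2.1 ++ [path], seen)
          else
            (st.1 ++ [path], st.2.1, seen)) (a, b, s)).2.1
      = b ++ pvDD (xs.filter (pvExcl ex)) f := by
  induction xs generalizing a b s f with
  | nil => simp [pvDD]
  | cons p t ih =>
    simp only [List.foldl_cons, List.filter_cons, hf p]
    by_cases hp : p = "" ∨ f p = true
    · rw [if_pos hp]
      rcases ih a b s f hf with ⟨h1, h2⟩
      rw [h1, h2]
      by_cases he : pvExcl ex p = true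
      · rw [if_neg (c := (!pvExcl ex p) = true) (by simp [he]), if_pos he,
            pvDD_cons_skip p _ f hp]
        exact ⟨rfl, rfl⟩
      · have heb : pvExcl ex p = false := eq_false_of_ne_true he
        rw [if_pos (c := (!pvExcl ex p) = true) (by simp [heb]), if_neg he,
            pvDD_cons_skip p _ f hp]
        exact ⟨rfl, rfl⟩
    · rw [if_neg hp]
      have hf' := contains_add_fun s f p hf
      by_cases he : pvExcl ex p = true
      · have hcond : PySem.Str.startswith p ".git" = true ∨ (ex.any fun prefix_ => PySem.Str.startswith p prefix_) = true := by
          simpa [pvExcl] using he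
        rw [if_pos hcond]
        rcases ih a (b ++ [p]) (s.add p) _ hf' with ⟨h1, h2⟩
        have hpn : p ∉ List.filter (fun q => !pvExcl ex q) t := by
          intro m
          have := List.of_mem_filter m
          simp [he] at this
        constructor
        · rw [h1, if_neg (c := (!pvExcl ex p) = true) (by simp [he]),
              pvDD_notmem _ f p hpn]
        · rw [h2, if_pos he, pvDD_cons_keep p _ f hp]
          simp
      · have hcond : ¬ (PySem.Str.startswith p ".git" = true ∨ (ex.any fun prefix_ => PySem.Str.startswith p prefix_) = true) := by
          simpa [pvExcl] using he
        rw [if_neg hcond]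
        rcases ih (a ++ [p]) b (s.add p) _ hf' with ⟨h1, h2⟩
        have hpn : p ∉ List.filter (pvExcl ex) t := by
          intro m
          have := List.of_mem_filter m
          simp [he] at this
        have heb : pvExcl ex p = false := eq_false_of_ne_true he
        constructor
        · rw [h1, if_pos (c := (!pvExcl ex p) = true) (by simp [heb]),
              pvDD_cons_keep p _ f hp]
          simp
        · rw [h2, if_neg he, pvDD_notmem _ f p hpn]

-- ===== VERDICT (by name: the statement is the Claim_ definition above) =====
theorem filter_effective_changed_files_spec : Claim_equal_filter_effective_changed_files := by
  intro changed_files exclude_prefixes _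
  unfold Spec_filter_effective_changed_files
  unfold filter_effective_changed_files filter_effective_changed_files_alt
  rw [partition_fold]
  rcases bfold exclude_prefixes changed_files [] [] PySem.Set.empty (fun _ => false)
    (by intro x; rfl) with ⟨h1, h2⟩
  simp only [h1, h2, List.nil_append, dedupePaths_eq]
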